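-- pv_equiv track=rewrite | github.com/paesanilab/MB-Fit | qm_mb_energy_calculator/src/mbdecomp.py | build_frag_indices
-- ===== SOURCE A (Python) =====
-- import itertools
--
-- def build_frag_indices(index_list, mbdecomp):
--     # used to hold array of combinations of index_list
--     combinations_arr = []
--
--     # if mbdecomp is False, just return a copy of index_list
--     if mbdecomp == False:
--         combinations_arr.append([index_list[:]])
--         return combinations_arr
--
--     # if mbdecomp is True, return array of every possible combination of index_list
--     for n in range(1, len(index_list) + 1):
--         # create array to hold all combinations of length n
--         size_n_combinations = []
--         for combination in itertools.combinations(index_list, n):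
--             size_n_combinations.append(combination)
--         # append array of all combinations of size n to the main cominations array
--         combinations_arr.append(size_n_combinations)
--     return combinations_arr
-- ===== SOURCE B (Python) =====
-- def build_frag_indices(index_list, mbdecomp):
--     # Single recursive power-set DFS (include-first) bucketed by subset size,
--     # instead of one itertools.combinations pass per size.
--     if mbdecomp == False:
--         return [[index_list[:]]]
--     buckets = [[] for _ in range(len(index_list) + 1)]
--
--     def dfs(rest, cur):
--         if not rest:
--             buckets[len(cur)].append(tuple(cur))
--         else:
--             dfs(rest[1:], cur + [rest[0]])  # include first element
--             dfs(rest[1:], cur)              # then exclude it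
--     dfs(index_list, [])
--     return buckets[1:]
-- ===== Notes on version B (the rewrite author's own statement) =====
-- stated objective: alternative
-- what changed: Replaces the per-size loop over itertools.combinations with one include-first recursive power-set DFS that drops each completed subset into a bucket indexed by its size, then returns buckets 1..n.
import Mathlib
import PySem

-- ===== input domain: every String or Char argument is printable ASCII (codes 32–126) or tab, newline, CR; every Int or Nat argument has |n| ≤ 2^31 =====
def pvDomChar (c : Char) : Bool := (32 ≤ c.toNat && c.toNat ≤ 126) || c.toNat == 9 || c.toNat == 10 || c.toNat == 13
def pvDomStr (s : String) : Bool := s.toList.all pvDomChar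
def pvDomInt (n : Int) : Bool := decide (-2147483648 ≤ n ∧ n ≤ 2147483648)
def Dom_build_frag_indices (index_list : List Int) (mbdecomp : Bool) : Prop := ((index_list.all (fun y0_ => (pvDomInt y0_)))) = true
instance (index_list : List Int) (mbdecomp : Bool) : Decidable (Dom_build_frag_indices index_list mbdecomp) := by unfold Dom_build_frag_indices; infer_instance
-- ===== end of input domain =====

-- B replaces A's per-size itertools.combinations loop by one include-first power-set DFS
-- bucketed by subset size (objective: alternative decomposition, same output).

-- ===== PORT A =====
-- itertools.combinations(xs, n) in its exact lexicographic-by-position emission order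
-- (combinations starting with the first element first, then those without it).
def combosA : List Int → Nat → List (List Int)
  | _, 0 => [[]]
  | [], _ + 1 => []
  | x :: xs, n + 1 => ((combosA xs n).map (fun c => x :: c)) ++ combosA xs (n + 1)

def build_frag_indices (index_list : List Int) (mbdecomp : Bool) : List (List (List Int)) :=
  if mbdecomp = false then
    [[index_list]]
  else
    -- for n in range(1, len(index_list) + 1): append the size-n combination list
    (PySem.List.pyRange 1 ((index_list.length : Int) + 1) 1).foldl
      (fun acc n => acc ++ [combosA index_list n.toNat]) []

-- ===== PORT B =====
-- dfs(rest, cur): when rest is exhausted append cur to buckets[len(cur)];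
-- otherwise recurse including rest's head first, then excluding it.
def dfsB : List Int → List Int → List (List (List Int)) → List (List (List Int))
  | [], cur, buckets => buckets.modify cur.length (fun b => b ++ [cur])
  | x :: rest, cur, buckets => dfsB rest cur (dfsB rest (cur ++ [x]) buckets)

def build_frag_indices_alt (index_list : List Int) (mbdecomp : Bool) : List (List (List Int)) :=
  if mbdecomp = false then
    [[index_list]]
  else
    (dfsB index_list [] (List.replicate (index_list.length + 1) [])).drop 1

-- ===== PRECONDITION & SPEC =====
def Spec_build_frag_indices (index_list : List Int) (mbdecomp : Bool) (out : List (List (List Int))) : Prop := out = build_frag_indices_alt index_list mbdecomp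
instance (index_list : List Int) (mbdecomp : Bool) (out : List (List (List Int))) : Decidable (Spec_build_frag_indices index_list mbdecomp out) := by unfold Spec_build_frag_indices; infer_instance

-- ===== CLAIM (what is proved, stated in full; the proofs are below) =====
def Claim_equal_build_frag_indices : Prop := ∀ (index_list : List Int) (mbdecomp : Bool), Dom_build_frag_indices index_list mbdecomp → Spec_build_frag_indices index_list mbdecomp (build_frag_indices index_list mbdecomp)

-- ===== LEMMAS AND PROOFS =====

-- the bucket transformation dfsB performs, expressed positionally
def dfsF (xs cur : List Int) (i : Nat) (bucket : List (List Int)) : List (List Int) :=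
  if cur.length ≤ i then bucket ++ (combosA xs (i - cur.length)).map (fun s => cur ++ s)
  else bucket

theorem modify_eq_mapIdx {α : Type} (l : List α) (i : Nat) (f : α → α) :
    l.modify i f = l.mapIdx (fun j a => if i = j then f a else a) := by
  apply List.ext_getElem?
  intro j
  rw [List.getElem?_modify, List.getElem?_mapIdx]
  cases l[j]? <;> simp

theorem mapIdx_replicate' {α β : Type} (f : Nat → α → β) (x : α) (m : Nat) :
    (List.replicate m x).mapIdx f = (List.range m).map (fun i => f i x) := by
  induction m generalizing f with
  | zero => simp
  | succ m ih =>
    simp [List.replicate_succ, List.mapIdx_cons, ih, List.range_succ_eq_map,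
      List.map_map, Function.comp_def, Nat.succ_eq_add_one]

theorem dfsB_eq (xs cur : List Int) (b : List (List (List Int))) :
    dfsB xs cur b = b.mapIdx (dfsF xs cur) := by
  induction xs generalizing cur b with
  | nil =>
    show b.modify cur.length (fun b => b ++ [cur]) = _
    rw [modify_eq_mapIdx]
    congr 1
    funext j a
    unfold dfsF
    by_cases h : cur.length = j
    · subst h; simp [combosA]
    · by_cases h2 : cur.length ≤ j
      · have hk : j - cur.length = (j - cur.length - 1) + 1 := by omega
        rw [if_neg h, if_pos h2, hk]
        simp [combosA]
      · simp [h, h2]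
  | cons x xs ih =>
    show dfsB xs cur (dfsB xs (cur ++ [x]) b) = _
    rw [ih, ih, List.mapIdx_mapIdx]
    congr 1
    funext i a
    simp only [Function.comp]
    unfold dfsF
    by_cases h1 : cur.length + 1 ≤ i
    · have h0 : cur.length ≤ i := by omega
      have hlen : (cur ++ [x]).length = cur.length + 1 := by simp
      have hk : i - cur.length = (i - (cur.length + 1)) + 1 := by omega
      rw [hlen]
      rw [if_pos h1, if_pos h0, hk]
      simp only [combosA, List.map_append, List.map_map, List.append_assoc]
      simp [h0, Function.comp_def]
    · have hlen : (cur ++ [x]).length = cur.length + 1 := by simp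
      rw [hlen]
      by_cases h0 : cur.length ≤ i
      · have hi : i = cur.length := by omega
        simp [hi, combosA]
      · simp [h0, h1]

theorem foldl_append_singleton (g : Int → List (List Int)) (l : List Int)
    (init : List (List (List Int))) :
    l.foldl (fun acc m => acc ++ [g m]) init = init ++ l.map g := by
  induction l generalizing init with
  | nil => simp
  | cons m l ih => simp [ih]

theorem buildA_true (il : List Int) :
    build_frag_indices il true = (List.range il.length).map (fun k => combosA il (k + 1)) := by
  unfold build_frag_indices
  rw [if_neg (by simp)]
  rw [foldl_append_singleton]
  rw [PySem.List.pyRange_one]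
  have : ((il.length : Int) + 1 - 1).toNat = il.length := by omega
  rw [this, List.map_map, List.nil_append]
  apply List.map_congr_left
  intro k _
  simp only [Function.comp]
  congr 1
  omega

theorem buildB_true (il : List Int) :
    build_frag_indices_alt il true = (List.range il.length).map (fun k => combosA il (k + 1)) := by
  unfold build_frag_indices_alt
  rw [if_neg (by simp)]
  rw [dfsB_eq, mapIdx_replicate']
  have hF : ∀ i : Nat, dfsF il [] i [] = combosA il i := by
    intro i
    unfold dfsF
    simp
  simp only [hF]
  rw [List.range_succ_eq_map, List.map_cons, List.drop_one, List.tail_cons, List.map_map]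
  rfl

-- ===== VERDICT (by name: the statement is the Claim_ definition above) =====
theorem build_frag_indices_spec : Claim_equal_build_frag_indices := by
  intro il mb _
  unfold Spec_build_frag_indices
  cases mb with
  | false => rfl
  | true => rw [buildA_true, buildB_true]
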